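-- pv_equiv track=rewrite | github.com/ljm0850/algo-problem | 2157 여행.py | solution
-- ===== SOURCE A (Python) =====
-- def solution(N:int,M:int,graph:list)->int:
--     # dp[a][b] 는 b개의 도시를 거쳐 a 지점에 도착했을때 최대값
--     dp = [[0]*(M+1) for _ in range(N+1)]
--     # 1에서 출발함, 2개 도시 거쳤을때 세팅
--     for i in range(2,N+1):
--         dp[i][2] = graph[1][i]
--     # i는 도시, j는 거쳐간 도시의 수, k는 i도시에 도착하기 위해선 i보다 작은 지점에서 출발해야 하므로 i미만의 도시
--     for i in range(2,N+1):
--         for j in range(3,M+1):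
--             for k in range(1,i):
--                 if graph[k][i] and dp[k][j-1]:
--                     dp[i][j] = max(dp[i][j],dp[k][j-1]+graph[k][i])
--     return max(dp[N])
-- ===== SOURCE B (Python) =====
-- def solution(N: int, M: int, graph: list) -> int:
--     # Top-down memoized recursion: best(i, j) = longest total from city 1
--     # reaching city i through exactly j cities (0 means no such path),
--     # instead of A's bottom-up triple-loop table fill.
--     if N < 2:
--         return 0
--     memo = {}
--
--     def best(i, j):
--         if (i, j) in memo:
--             return memo[(i, j)]
--         if j == 2:
--             v = graph[1][i] if i > 1 else 0
--         else:
--             v = 0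
--             for k in range(1, i):
--                 w = graph[k][i]
--                 p = best(k, j - 1)
--                 if w and p and p + w > v:
--                     v = p + w
--         memo[(i, j)] = v
--         return v
--
--     ans = 0
--     for j in range(2, M + 1):
--         ans = max(ans, best(N, j))
--     return ans
-- ===== Notes on version B (the rewrite author's own statement) =====
-- stated objective: alternative
-- what changed: Replaces A's bottom-up triple-loop fill of a full (N+1)x(M+1) table with a top-down memoized recursion best(i,j) (longest total from city 1 to city i through exactly j cities), computing states on demand and folding max over j = 2..M.
import Mathlib
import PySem

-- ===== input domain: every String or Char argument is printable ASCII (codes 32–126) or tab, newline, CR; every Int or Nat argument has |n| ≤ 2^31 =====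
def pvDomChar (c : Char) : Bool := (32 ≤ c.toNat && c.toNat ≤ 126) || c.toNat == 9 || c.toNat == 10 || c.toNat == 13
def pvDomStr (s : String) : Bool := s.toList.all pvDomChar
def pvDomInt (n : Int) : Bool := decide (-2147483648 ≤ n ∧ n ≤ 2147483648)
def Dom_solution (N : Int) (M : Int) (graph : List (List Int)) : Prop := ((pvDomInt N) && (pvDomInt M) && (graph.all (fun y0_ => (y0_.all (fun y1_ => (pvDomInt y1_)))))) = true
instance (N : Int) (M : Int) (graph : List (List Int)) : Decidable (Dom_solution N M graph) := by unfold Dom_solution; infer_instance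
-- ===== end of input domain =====

-- B is a different decomposition: top-down memoized recursion best(i, j) (longest total
-- from city 1 to city i through exactly j cities) instead of A's bottom-up triple-loop
-- table fill; the memo dict of Source B only caches values of this recursion, so the port
-- is the recursion itself.

-- shared indexing helper: x[i][j] (both Pythons read graph cells this way)
def gg (xs : List (List Int)) (i j : Int) : Int :=
  PySem.List.pyGetD (PySem.List.pyGetD xs i []) j 0

-- ===== PORT A =====
-- dp[i][j] = v
def s2 (dp : List (List Int)) (i j v : Int) : List (List Int) :=
  PySem.List.pySetD dp i (PySem.List.pySetD (PySem.List.pyGetD dp i []) j v)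

def solution (N : Int) (M : Int) (graph : List (List Int)) : Int :=
  let dp0 := List.replicate (N + 1).toNat (List.replicate (M + 1).toNat (0 : Int))
  let dp1 := (PySem.List.pyRange 2 (N + 1) 1).foldl
    (fun dp i => s2 dp i 2 (gg graph 1 i)) dp0
  let dp2 := (PySem.List.pyRange 2 (N + 1) 1).foldl (fun dp i =>
    (PySem.List.pyRange 3 (M + 1) 1).foldl (fun dp j =>
      (PySem.List.pyRange 1 i 1).foldl (fun dp k =>
        if gg graph k i ≠ 0 ∧ gg dp k (j - 1) ≠ 0 then
          s2 dp i j (max (gg dp i j) (gg dp k (j - 1) + gg graph k i))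
        else dp) dp) dp) dp1
  (PySem.List.max? (PySem.List.pyGetD dp2 N []) (fun y => y)).getD 0

-- ===== PORT B =====
-- best(i, j) of Source B with t = j - 2: base t = 0 is graph[1][i] (0 for i = 1),
-- step recurses on t over k in range(1, i) with strict-improvement updates
def bbest (graph : List (List Int)) : Nat → Int → Int
  | 0, i => if 1 < i then gg graph 1 i else 0
  | t + 1, i => (PySem.List.pyRange 1 i 1).foldl (fun v k =>
      let w := gg graph k i
      let p := bbest graph t k
      if w ≠ 0 ∧ p ≠ 0 ∧ v < p + w then p + w else v) 0

def solution_alt (N : Int) (M : Int) (graph : List (List Int)) : Int :=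
  if N < 2 then 0
  else (PySem.List.pyRange 2 (M + 1) 1).foldl
    (fun ans j => max ans (bbest graph (j - 2).toNat N)) 0

-- ===== PRECONDITION & SPEC =====
-- Pre_ excludes exactly the inputs where Python A raises: negative N (dp[N] IndexError),
-- M < 0 (max of an empty row, ValueError), and, when N ≥ 2, M < 2 (dp[i][2] IndexError),
-- a graph missing row 1 or column i ≤ N of row 1, and, when moreover M ≥ 3, a graph
-- missing row k (1 ≤ k < N) or column i ≤ N of such a row.
def Pre_solution (N : Int) (M : Int) (graph : List (List Int)) : Prop :=
  0 ≤ N ∧ 0 ≤ M ∧ (2 ≤ N → 2 ≤ M ∧ (2 : Int) ≤ graph.length ∧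
    N + 1 ≤ ((graph.getD 1 []).length : Int) ∧
    (3 ≤ M → N ≤ (graph.length : Int) ∧
      ∀ row ∈ (graph.drop 1).take (N - 1).toNat, N + 1 ≤ (row.length : Int)))
instance (N : Int) (M : Int) (graph : List (List Int)) : Decidable (Pre_solution N M graph) := by
  unfold Pre_solution; infer_instance

def pvWitness_solution : Int × Int × List (List Int) :=
  (3, 3, [[0, 0, 0, 0], [0, 0, 1, 2], [0, 0, 0, 3], [0, 0, 0, 0]])

def Spec_solution (N : Int) (M : Int) (graph : List (List Int)) (out : Int) : Prop := out = solution_alt N M graph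
instance (N : Int) (M : Int) (graph : List (List Int)) (out : Int) : Decidable (Spec_solution N M graph out) := by unfold Spec_solution; infer_instance

-- ===== CLAIM (what is proved, stated in full; the proofs are below) =====
def Claim_equal_solution : Prop := ∀ (N : Int) (M : Int) (graph : List (List Int)), Dom_solution N M graph → Pre_solution N M graph → Spec_solution N M graph (solution N M graph)

-- ===== LEMMAS AND PROOFS =====

-- entry (r,c) of the table, Nat indices
def e (dp : List (List Int)) (r c : Nat) : Int := (dp.getD r []).getD c 0

-- shape: n+1 rows of m+1 cells
def Sh (n m : Nat) (dp : List (List Int)) : Prop :=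
  dp.length = n + 1 ∧ ∀ row ∈ dp, row.length = m + 1

-- the k-loop candidate ending at i, computed from a stored previous layer
def bInner (graph : List (List Int)) (layer : List Int) (i : Int) : Int :=
  (PySem.List.pyRange 1 i 1).foldl (fun b k =>
    let w := gg graph k i
    let p := PySem.List.pyGetD layer k 0
    if w ≠ 0 ∧ p ≠ 0 ∧ b < p + w then p + w else b) 0

def bLayer (N : Int) (graph : List (List Int)) (layer : List Int) : List Int :=
  (PySem.List.pyRange 2 (N + 1) 1).foldl (fun cur i => cur ++ [bInner graph layer i]) [0, 0]

-- layer t = best totals reaching each city through exactly t+2 cities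
def lyr (N : Int) (graph : List (List Int)) : Nat → List Int
  | 0 => [0, 0] ++ (PySem.List.pyRange 2 (N + 1) 1).map (fun i => gg graph 1 i)
  | t + 1 => bLayer N graph (lyr N graph t)

-- the value A's finished table holds at (r,c)
def W (N : Int) (graph : List (List Int)) (r c : Nat) : Int :=
  if 2 ≤ c then (lyr N graph (c - 2)).getD r 0 else 0


-- ---- small generic list lemmas ----
theorem set_oob {α : Type} (l : List α) (i : Nat) (v : α) (h : l.length ≤ i) :
    l.set i v = l := by
  induction l generalizing i with
  | nil => simp
  | cons a t ih =>
    cases i with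
    | zero => simp at h
    | succ i => simp [List.set, ih i (by simpa using h)]

theorem set_getD_self {α : Type} (l : List α) (i : Nat) (d : α) :
    l.set i (l.getD i d) = l := by
  induction l generalizing i with
  | nil => simp
  | cons a t ih =>
    cases i with
    | zero => simp
    | succ i => simpa using ih i

theorem foldl_fixed {α β : Type} (f : α → β → α) (a : α) (l : List β)
    (h : ∀ x ∈ l, f a x = a) : l.foldl f a = a := by
  induction l with
  | nil => rfl
  | cons x t ih =>
    rw [List.foldl_cons, h x (by simp)]
    exact ih (fun y hy => h y (by simp [hy]))

theorem getD_set {α : Type} (l : List α) (i r : Nat) (v d : α) (hi : i < l.length) :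
    (l.set i v).getD r d = if r = i then v else l.getD r d := by
  simp only [List.getD, List.getElem?_set]
  by_cases h : i = r
  · subst h; simp [hi]
  · rw [if_neg h, if_neg (fun hh => h hh.symm)]



-- ---- table set/get ----
theorem eSet (n m : Nat) (dp : List (List Int)) (hSh : Sh n m dp) (i j : Nat)
    (hi : i < n + 1) (hj : j < m + 1) (v : Int) :
    Sh n m (s2 dp (↑i) (↑j) v) ∧
      ∀ r c : Nat, e (s2 dp (↑i) (↑j) v) r c = if r = i ∧ c = j then v else e dp r c := by
  obtain ⟨hlen, hrow⟩ := hSh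
  have hilen : i < dp.length := by omega
  have hmem : dp.getD i [] ∈ dp := by
    rw [List.getD_eq_getElem _ _ hilen]; exact List.getElem_mem _
  have hrowi : (dp.getD i []).length = m + 1 := hrow _ hmem
  have hs2 : s2 dp (↑i) (↑j) v = dp.set i ((dp.getD i []).set j v) := by
    simp [s2]
  constructor
  · refine ⟨by simp [hs2, hlen], ?_⟩
    intro row hrmem
    rw [hs2] at hrmem
    rcases List.mem_or_eq_of_mem_set hrmem with h | h
    · exact hrow _ h
    · rw [h, List.length_set]; exact hrowi
  · intro r c
    rw [hs2, e, getD_set dp i r _ [] hilen]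
    by_cases hri : r = i
    · subst hri
      rw [if_pos rfl, getD_set _ j c v 0 (by omega)]
      by_cases hcj : c = j
      · simp [hcj]
      · simp [hcj, e, List.getD_eq_getElem?_getD]
    · rw [if_neg hri, if_neg (by tauto), e]

-- ---- layer lemmas ----
theorem bLayer_eq_map (N : Int) (graph : List (List Int)) (l : List Int) :
    bLayer N graph l = [0, 0] ++ (PySem.List.pyRange 2 (N + 1) 1).map (bInner graph l) := by
  rw [bLayer, PySem.List.foldl_append_singleton_eq_map]

theorem getD_base (N : Int) (hN : 2 ≤ N) (f : Int → Int) (i : Nat) (h2 : 2 ≤ i)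
    (hn : i ≤ N.toNat) :
    ([(0 : Int), 0] ++ (PySem.List.pyRange 2 (N + 1) 1).map f).getD i 0 = f (↑i) := by
  rw [PySem.List.pyRange_one, List.map_map]
  rw [List.getD_eq_getElem?_getD, List.getElem?_append_right (by simp; omega)]
  have hlt : i - [(0 : Int), 0].length < (N + 1 - 2).toNat := by simp; omega
  rw [List.getElem?_map, List.getElem?_range hlt]
  simp only [List.length_cons, List.length_nil, Option.map_some, Option.getD_some,
    Function.comp_apply]
  congr 1
  omega

theorem lyr_zero_getD (N : Int) (graph : List (List Int)) (hN : 2 ≤ N) (i : Nat)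
    (h2 : 2 ≤ i) (hn : i ≤ N.toNat) :
    (lyr N graph 0).getD i 0 = gg graph 1 (↑i) := getD_base N hN _ i h2 hn

theorem lyr_succ_getD (N : Int) (graph : List (List Int)) (hN : 2 ≤ N) (t : Nat) (i : Nat)
    (h2 : 2 ≤ i) (hn : i ≤ N.toNat) :
    (lyr N graph (t + 1)).getD i 0 = bInner graph (lyr N graph t) (↑i) := by
  rw [lyr, bLayer_eq_map]; exact getD_base N hN _ i h2 hn

theorem lyr_getD_lt (N : Int) (graph : List (List Int)) (t : Nat) (i : Nat) (hi : i < 2) :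
    (lyr N graph t).getD i 0 = 0 := by
  have h : ∀ l : List Int, ([(0 : Int), 0] ++ l).getD i 0 = 0 := by
    intro l; interval_cases i <;> rfl
  cases t with
  | zero => exact h _
  | succ t => rw [lyr, bLayer_eq_map]; exact h _


theorem gg_natCast (dp : List (List Int)) (a b : Nat) : gg dp (↑a) (↑b) = e dp a b := by
  simp [gg, e]

theorem kfold (N M : Int) (graph : List (List Int)) (i j : Nat)
    (hj3 : 3 ≤ j) (hin : i < N.toNat + 1) (hjm : j < M.toNat + 1) :
    ∀ (ks : List Int), (∀ k ∈ ks, 1 ≤ k ∧ k < (i : Int)) →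
    ∀ dp, Sh N.toNat M.toNat dp →
      Sh N.toNat M.toNat (ks.foldl (fun dp k =>
        if gg graph k (↑i) ≠ 0 ∧ gg dp k ((↑j : Int) - 1) ≠ 0 then
          s2 dp (↑i) (↑j) (max (gg dp (↑i) (↑j)) (gg dp k ((↑j) - 1) + gg graph k (↑i)))
        else dp) dp) ∧
      ∀ r c : Nat, e (ks.foldl (fun dp k =>
        if gg graph k (↑i) ≠ 0 ∧ gg dp k ((↑j : Int) - 1) ≠ 0 then
          s2 dp (↑i) (↑j) (max (gg dp (↑i) (↑j)) (gg dp k ((↑j) - 1) + gg graph k (↑i)))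
        else dp) dp) r c =
        if r = i ∧ c = j then
          ks.foldl (fun b k =>
            if gg graph k (↑i) ≠ 0 ∧ e dp k.toNat (j - 1) ≠ 0 then
              max b (e dp k.toNat (j - 1) + gg graph k (↑i)) else b) (e dp i j)
        else e dp r c := by
  intro ks
  induction ks with
  | nil =>
    intro _ dp hSh
    refine ⟨hSh, ?_⟩
    intro r c
    by_cases h : r = i ∧ c = j
    · obtain ⟨h1, h2⟩ := h; subst h1; subst h2; simp
    · rw [if_neg h]; rfl
  | cons k ks ih =>
    intro hks dp hSh
    obtain ⟨hk1, hki⟩ := hks k (by simp)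
    have hkcast : (k : Int) = ((k.toNat : Nat) : Int) := by omega
    have hjcast : ((↑j : Int) - 1) = ((j - 1 : Nat) : Int) := by omega
    have hktn : k.toNat < i := by omega
    simp only [List.foldl_cons]
    have hread : gg dp (↑k) ((↑j : Int) - 1) = e dp k.toNat (j - 1) := by
      rw [hjcast]; conv_lhs => rw [hkcast, gg_natCast]
    by_cases hgate : gg graph (↑k) (↑i) ≠ 0 ∧ e dp k.toNat (j - 1) ≠ 0
    · rw [if_pos (by rw [hread]; exact hgate), if_pos hgate]
      rw [hread, gg_natCast]
      set v := max (e dp i j) (e dp k.toNat (j - 1) + gg graph (↑k) (↑i)) with hv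
      obtain ⟨hSh', hent'⟩ := eSet N.toNat M.toNat dp hSh i j hin hjm v
      obtain ⟨hShF, hentF⟩ := ih (fun k' hk' => hks k' (by simp [hk'])) _ hSh'
      refine ⟨hShF, ?_⟩
      intro r c
      rw [hentF r c]
      have hcongr : (ks.foldl (fun b k' =>
            if gg graph k' (↑i) ≠ 0 ∧ e (s2 dp (↑i) (↑j) v) k'.toNat (j - 1) ≠ 0 then
              max b (e (s2 dp (↑i) (↑j) v) k'.toNat (j - 1) + gg graph k' (↑i)) else b)
            (e (s2 dp (↑i) (↑j) v) i j)) =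
          (ks.foldl (fun b k' =>
            if gg graph k' (↑i) ≠ 0 ∧ e dp k'.toNat (j - 1) ≠ 0 then
              max b (e dp k'.toNat (j - 1) + gg graph k' (↑i)) else b) v) := by
        have hbase : e (s2 dp (↑i) (↑j) v) i j = v := by rw [hent' i j]; simp
        rw [hbase]
        apply PySem.List.foldl_congr_mem
        intro b k' hk'
        obtain ⟨hk'1, hk'i⟩ := hks k' (by simp [hk'])
        have : e (s2 dp (↑i) (↑j) v) k'.toNat (j - 1) = e dp k'.toNat (j - 1) := by
          rw [hent']
          rw [if_neg (by intro hh; omega)]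
        rw [this]
      rw [hcongr]
      by_cases h : r = i ∧ c = j
      · rw [if_pos h, if_pos h]
      · rw [if_neg h, if_neg h, hent' r c, if_neg h]
    · rw [if_neg (by rw [hread]; exact hgate), if_neg hgate]
      exact ih (fun k' hk' => hks k' (by simp [hk'])) dp hSh


theorem e_dp0 (a b : Nat) (r c : Nat) :
    e (List.replicate a (List.replicate b (0 : Int))) r c = 0 := by
  unfold e
  simp [List.getD_eq_getElem?_getD, List.getElem?_replicate]
  split_ifs <;> simp [List.getElem?_replicate] <;> split_ifs <;> simp

theorem Sh_dp0 (N M : Int) (h0N : 0 ≤ N) (h0M : 0 ≤ M) :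
    Sh N.toNat M.toNat (List.replicate (N + 1).toNat (List.replicate (M + 1).toNat (0 : Int))) := by
  constructor
  · simp; omega
  · intro row hrow
    rw [List.eq_of_mem_replicate hrow]
    simp; omega

theorem dp1_aux (N M : Int) (graph : List (List Int)) (hN : 2 ≤ N) (hM : 2 ≤ M) :
    ∀ t : Nat, t ≤ N.toNat - 1 →
      Sh N.toNat M.toNat ((PySem.List.pyRange 2 (2 + (t : Int)) 1).foldl
        (fun dp i => s2 dp i 2 (gg graph 1 i))
        (List.replicate (N + 1).toNat (List.replicate (M + 1).toNat (0 : Int)))) ∧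
      ∀ r c : Nat, e ((PySem.List.pyRange 2 (2 + (t : Int)) 1).foldl
        (fun dp i => s2 dp i 2 (gg graph 1 i))
        (List.replicate (N + 1).toNat (List.replicate (M + 1).toNat (0 : Int)))) r c =
          if 2 ≤ r ∧ r < 2 + t ∧ c = 2 then gg graph 1 (↑r) else 0 := by
  intro t
  induction t with
  | zero =>
    intro _
    rw [show (2 + ((0 : Nat) : Int)) = 2 by norm_num, PySem.List.pyRange_one_eq_nil (by omega)]
    simp only [List.foldl_nil]
    refine ⟨Sh_dp0 N M (by omega) (by omega), ?_⟩
    intro r c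
    rw [e_dp0, if_neg (by omega)]
  | succ t ih =>
    intro ht
    obtain ⟨ihSh, ihe⟩ := ih (by omega)
    have hsplit : (2 + ((t + 1 : Nat) : Int)) = (2 + (t : Int)) + 1 := by push_cast; ring
    rw [hsplit, PySem.List.pyRange_one_succ_right (by omega), List.foldl_append, List.foldl_cons,
      List.foldl_nil]
    have hcast2 : (2 + (t : Int)) = ((2 + t : Nat) : Int) := by push_cast; ring
    have hcast2' : ((2 : Int)) = (((2 : Nat) : Nat) : Int) := by norm_num
    set F := (PySem.List.pyRange 2 (2 + (t : Int)) 1).foldl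
        (fun dp i => s2 dp i 2 (gg graph 1 i))
        (List.replicate (N + 1).toNat (List.replicate (M + 1).toNat (0 : Int))) with hF
    have := eSet N.toNat M.toNat F ihSh (2 + t) 2 (by omega) (by omega) (gg graph 1 (2 + (t : Int)))
    rw [← hcast2, show (((2 : Nat)) : Int) = (2 : Int) by norm_num] at this
    obtain ⟨hSh', hent'⟩ := this
    refine ⟨hSh', ?_⟩
    intro r c
    rw [hent' r c]
    by_cases h : r = 2 + t ∧ c = 2
    · rw [if_pos h, if_pos (by omega)]
      obtain ⟨h1, _⟩ := h
      subst h1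
      congr 1
    · rw [if_neg h, ihe r c]
      split_ifs <;> first | rfl | omega


theorem step_eq (w p b : Int) :
    (if w ≠ 0 ∧ p ≠ 0 ∧ b < p + w then p + w else b) =
      (if w ≠ 0 ∧ p ≠ 0 then max b (p + w) else b) := by
  by_cases h : p + w ≤ b
  · rw [if_neg (by rintro ⟨_, _, hb⟩; omega)]
    by_cases hw : w ≠ 0 ∧ p ≠ 0
    · rw [if_pos hw, max_eq_left h]
    · rw [if_neg hw]
  · by_cases hw : w ≠ 0 ∧ p ≠ 0
    · rw [if_pos ⟨hw.1, hw.2, by omega⟩, if_pos hw, max_eq_right (by omega)]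
    · rw [if_neg (by rintro ⟨h1, h2, _⟩; exact hw ⟨h1, h2⟩), if_neg hw]

theorem cell_eq (N : Int) (graph : List (List Int)) (hN : 2 ≤ N) (i j : Nat)
    (h2i : 2 ≤ i) (hin : i ≤ N.toNat) (hj3 : 3 ≤ j) :
    (PySem.List.pyRange 1 (↑i) 1).foldl (fun b k =>
        if gg graph k (↑i) ≠ 0 ∧ W N graph k.toNat (j - 1) ≠ 0 then
          max b (W N graph k.toNat (j - 1) + gg graph k (↑i)) else b) 0 = W N graph i j := by
  have hW : W N graph i j = bInner graph (lyr N graph (j - 3)) (↑i) := by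
    rw [W, if_pos (by omega), show j - 2 = (j - 3) + 1 by omega,
      lyr_succ_getD N graph hN _ i h2i hin]
  rw [hW, bInner]
  apply PySem.List.foldl_congr_mem
  intro b k hk
  obtain ⟨hk1, hki⟩ := (PySem.List.mem_pyRange_one).1 hk
  have hp : PySem.List.pyGetD (lyr N graph (j - 3)) k 0 = W N graph k.toNat (j - 1) := by
    rw [W, if_pos (by omega), show j - 1 - 2 = j - 3 by omega]
    conv_lhs => rw [show (k : Int) = ((k.toNat : Nat) : Int) by omega, PySem.List.pyGetD_natCast]
  dsimp only
  rw [hp, step_eq]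

theorem jfold_aux (N M : Int) (graph : List (List Int)) (hN : 2 ≤ N) (hM : 2 ≤ M)
    (i : Nat) (h2i : 2 ≤ i) (hin : i ≤ N.toNat) :
    ∀ s : Nat, 3 + s ≤ M.toNat + 1 →
    ∀ dp, Sh N.toNat M.toNat dp →
      (∀ r c : Nat, r ≤ N.toNat → c ≤ M.toNat →
        e dp r c = if c ≤ 2 ∨ r < i then W N graph r c else 0) →
      Sh N.toNat M.toNat ((PySem.List.pyRange 3 (3 + (s : Int)) 1).foldl (fun dp j =>
        (PySem.List.pyRange 1 (↑i) 1).foldl (fun dp k =>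
          if gg graph k (↑i) ≠ 0 ∧ gg dp k (j - 1) ≠ 0 then
            s2 dp (↑i) j (max (gg dp (↑i) j) (gg dp k (j - 1) + gg graph k (↑i)))
          else dp) dp) dp) ∧
      ∀ r c : Nat, r ≤ N.toNat → c ≤ M.toNat →
        e ((PySem.List.pyRange 3 (3 + (s : Int)) 1).foldl (fun dp j =>
          (PySem.List.pyRange 1 (↑i) 1).foldl (fun dp k =>
            if gg graph k (↑i) ≠ 0 ∧ gg dp k (j - 1) ≠ 0 then
              s2 dp (↑i) j (max (gg dp (↑i) j) (gg dp k (j - 1) + gg graph k (↑i)))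
            else dp) dp) dp) r c =
          if c ≤ 2 ∨ r < i ∨ (r = i ∧ c < 3 + s) then W N graph r c else 0 := by
  intro s
  induction s with
  | zero =>
    intro _ dp hSh hent
    rw [show (3 + ((0 : Nat) : Int)) = 3 by norm_num,
      PySem.List.pyRange_one_eq_nil (a := 3) (b := 3) (by omega)]
    simp only [List.foldl_nil]
    refine ⟨hSh, ?_⟩
    intro r c hr hc
    rw [hent r c hr hc]
    split_ifs <;> first | rfl | omega
  | succ s ih =>
    intro hs dp hSh hent
    obtain ⟨ihSh, ihe⟩ := ih (by omega) dp hSh hent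
    have hsplit : (3 + ((s + 1 : Nat) : Int)) = (3 + (s : Int)) + 1 := by push_cast; ring
    rw [hsplit, PySem.List.pyRange_one_succ_right (by omega), List.foldl_append, List.foldl_cons,
      List.foldl_nil]
    set F := (PySem.List.pyRange 3 (3 + (s : Int)) 1).foldl (fun dp j =>
        (PySem.List.pyRange 1 (↑i : Int) 1).foldl (fun dp k =>
          if gg graph k (↑i) ≠ 0 ∧ gg dp k (j - 1) ≠ 0 then
            s2 dp (↑i) j (max (gg dp (↑i) j) (gg dp k (j - 1) + gg graph k (↑i)))
          else dp) dp) dp with hF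
    have hcastj : (3 + (s : Int)) = (((3 + s : Nat)) : Int) := by push_cast; ring
    rw [hcastj]
    have hkf := kfold N M graph i (3 + s) (by omega) (by omega) (by omega)
      (PySem.List.pyRange 1 (↑i) 1)
      (fun k hk => (PySem.List.mem_pyRange_one).1 hk) F ihSh
    obtain ⟨hShF, hentF⟩ := hkf
    refine ⟨hShF, ?_⟩
    intro r c hr hc
    rw [hentF r c]
    have hbase : e F i (3 + s) = 0 := by
      rw [ihe i (3 + s) (by omega) (by omega), if_neg (by omega)]
    have hacc : ((PySem.List.pyRange 1 (↑i) 1).foldl (fun b k =>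
          if gg graph k (↑i) ≠ 0 ∧ e F k.toNat (3 + s - 1) ≠ 0 then
            max b (e F k.toNat (3 + s - 1) + gg graph k (↑i)) else b) (e F i (3 + s))) =
        W N graph i (3 + s) := by
      rw [hbase]
      rw [← cell_eq N graph hN i (3 + s) h2i hin (by omega)]
      apply PySem.List.foldl_congr_mem
      intro b k hk
      obtain ⟨hk1, hki⟩ := (PySem.List.mem_pyRange_one).1 hk
      have : e F k.toNat (3 + s - 1) = W N graph k.toNat (3 + s - 1) := by
        rw [ihe k.toNat (3 + s - 1) (by omega) (by omega), if_pos (by omega)]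
      rw [this]
    rw [hacc]
    by_cases h : r = i ∧ c = 3 + s
    · rw [if_pos h, if_pos (by omega)]
      obtain ⟨h1, h2⟩ := h; subst h1; subst h2; rfl
    · rw [if_neg h, ihe r c hr hc]
      split_ifs <;> first | rfl | omega



theorem jfold_full (N M : Int) (graph : List (List Int)) (hN : 2 ≤ N) (hM : 2 ≤ M)
    (i : Nat) (h2i : 2 ≤ i) (hin : i ≤ N.toNat) :
    ∀ dp, Sh N.toNat M.toNat dp →
      (∀ r c : Nat, r ≤ N.toNat → c ≤ M.toNat →
        e dp r c = if c ≤ 2 ∨ r < i then W N graph r c else 0) →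
      Sh N.toNat M.toNat ((PySem.List.pyRange 3 (M + 1) 1).foldl (fun dp j =>
        (PySem.List.pyRange 1 (↑i) 1).foldl (fun dp k =>
          if gg graph k (↑i) ≠ 0 ∧ gg dp k (j - 1) ≠ 0 then
            s2 dp (↑i) j (max (gg dp (↑i) j) (gg dp k (j - 1) + gg graph k (↑i)))
          else dp) dp) dp) ∧
      ∀ r c : Nat, r ≤ N.toNat → c ≤ M.toNat →
        e ((PySem.List.pyRange 3 (M + 1) 1).foldl (fun dp j =>
          (PySem.List.pyRange 1 (↑i) 1).foldl (fun dp k =>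
            if gg graph k (↑i) ≠ 0 ∧ gg dp k (j - 1) ≠ 0 then
              s2 dp (↑i) j (max (gg dp (↑i) j) (gg dp k (j - 1) + gg graph k (↑i)))
            else dp) dp) dp) r c =
          if c ≤ 2 ∨ r < i + 1 then W N graph r c else 0 := by
  intro dp hSh hent
  rw [show M + 1 = 3 + ((M.toNat - 2 : Nat) : Int) by omega]
  obtain ⟨hShF, hentF⟩ := jfold_aux N M graph hN hM i h2i hin (M.toNat - 2) (by omega) dp hSh hent
  refine ⟨hShF, ?_⟩
  intro r c hr hc
  rw [hentF r c hr hc]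
  split_ifs <;> first | rfl | omega

theorem ofold_aux (N M : Int) (graph : List (List Int)) (hN : 2 ≤ N) (hM : 2 ≤ M) :
    ∀ u : Nat, u ≤ N.toNat - 1 →
      Sh N.toNat M.toNat ((PySem.List.pyRange 2 (2 + (u : Int)) 1).foldl (fun dp i =>
        (PySem.List.pyRange 3 (M + 1) 1).foldl (fun dp j =>
          (PySem.List.pyRange 1 i 1).foldl (fun dp k =>
            if gg graph k i ≠ 0 ∧ gg dp k (j - 1) ≠ 0 then
              s2 dp i j (max (gg dp i j) (gg dp k (j - 1) + gg graph k i))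
            else dp) dp) dp)
        ((PySem.List.pyRange 2 (N + 1) 1).foldl (fun dp i => s2 dp i 2 (gg graph 1 i))
          (List.replicate (N + 1).toNat (List.replicate (M + 1).toNat (0 : Int))))) ∧
      ∀ r c : Nat, r ≤ N.toNat → c ≤ M.toNat →
        e ((PySem.List.pyRange 2 (2 + (u : Int)) 1).foldl (fun dp i =>
          (PySem.List.pyRange 3 (M + 1) 1).foldl (fun dp j =>
            (PySem.List.pyRange 1 i 1).foldl (fun dp k =>
              if gg graph k i ≠ 0 ∧ gg dp k (j - 1) ≠ 0 then
                s2 dp i j (max (gg dp i j) (gg dp k (j - 1) + gg graph k i))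
              else dp) dp) dp)
          ((PySem.List.pyRange 2 (N + 1) 1).foldl (fun dp i => s2 dp i 2 (gg graph 1 i))
            (List.replicate (N + 1).toNat (List.replicate (M + 1).toNat (0 : Int))))) r c =
          if c ≤ 2 ∨ r < 2 + u then W N graph r c else 0 := by
  have hdp1 := dp1_aux N M graph hN hM (N.toNat - 1) (le_refl _)
  rw [show (2 + ((N.toNat - 1 : Nat) : Int)) = N + 1 by omega] at hdp1
  obtain ⟨hSh1, hent1⟩ := hdp1
  have hent1' : ∀ r c : Nat, r ≤ N.toNat → c ≤ M.toNat →
      e ((PySem.List.pyRange 2 (N + 1) 1).foldl (fun dp i => s2 dp i 2 (gg graph 1 i))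
        (List.replicate (N + 1).toNat (List.replicate (M + 1).toNat (0 : Int)))) r c =
      if c ≤ 2 ∨ r < 2 then W N graph r c else 0 := by
    intro r c hr hc
    rw [hent1 r c]
    by_cases hc2 : c = 2
    · subst hc2
      by_cases h2r : 2 ≤ r
      · rw [if_pos ⟨h2r, by omega, rfl⟩, if_pos (by omega), W, if_pos (by omega),
          show 2 - 2 = 0 by rfl, lyr_zero_getD N graph hN r h2r hr]
      · rw [if_neg (by omega), if_pos (by omega), W, if_pos (by omega),
          show 2 - 2 = 0 by rfl, lyr_getD_lt N graph 0 r (by omega)]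
    · rw [if_neg (by omega)]
      by_cases hcle : c ≤ 1
      · rw [if_pos (by omega), W, if_neg (by omega)]
      · by_cases hr2 : r < 2
        · rw [if_pos (by omega), W, if_pos (by omega), lyr_getD_lt N graph _ r hr2]
        · rw [if_neg (by omega)]
  intro u
  induction u with
  | zero =>
    intro _
    rw [show (2 + ((0 : Nat) : Int)) = 2 by norm_num,
      PySem.List.pyRange_one_eq_nil (a := 2) (b := 2) (by omega)]
    simp only [List.foldl_nil]
    exact ⟨hSh1, hent1'⟩
  | succ u ih =>
    intro hu
    obtain ⟨ihSh, ihe⟩ := ih (by omega)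
    have hsplit : (2 + ((u + 1 : Nat) : Int)) = (2 + (u : Int)) + 1 := by push_cast; ring
    rw [hsplit, PySem.List.pyRange_one_succ_right (a := 2) (b := 2 + (u : Int)) (by omega),
      List.foldl_append, List.foldl_cons, List.foldl_nil]
    have hcasti : (2 + (u : Int)) = (((2 + u : Nat)) : Int) := by push_cast; ring
    rw [hcasti] at ihSh ihe ⊢
    have hjf := jfold_full N M graph hN hM (2 + u) (by omega) (by omega) _ ihSh
      (fun r c hr hc => ihe r c hr hc)
    obtain ⟨hShF, hentF⟩ := hjf
    refine ⟨hShF, ?_⟩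
    intro r c hr hc
    rw [hentF r c hr hc]
    split_ifs <;> first | rfl | omega

-- ---- B side ----
theorem pyGetD_toNat {α : Type} (xs : List α) (N : Int) (d : α) (h0 : 0 ≤ N) :
    PySem.List.pyGetD xs N d = xs.getD N.toNat d := by
  have h1 := PySem.List.pyGetD_natCast xs N.toNat d
  rw [show ((N.toNat : Nat) : Int) = N by omega] at h1
  exact h1

-- Source B's best(i, t+2) computes entry i of A's layer t
theorem bbest_eq_lyr (N : Int) (graph : List (List Int)) (hN : 2 ≤ N) :
    ∀ t : Nat, ∀ i : Int, 1 ≤ i → i ≤ N →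
      bbest graph t i = (lyr N graph t).getD i.toNat 0 := by
  intro t
  induction t with
  | zero =>
    intro i h1 hiN
    by_cases h : 1 < i
    · rw [show bbest graph 0 i = if 1 < i then gg graph 1 i else 0 from rfl, if_pos h,
        lyr_zero_getD N graph hN i.toNat (by omega) (by omega),
        show ((i.toNat : Nat) : Int) = i by omega]
    · rw [show bbest graph 0 i = if 1 < i then gg graph 1 i else 0 from rfl, if_neg h,
        lyr_getD_lt N graph 0 i.toNat (by omega)]
  | succ t ih =>
    intro i h1 hiN
    by_cases h2 : 2 ≤ i
    · rw [lyr_succ_getD N graph hN t i.toNat (by omega) (by omega),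
        show ((i.toNat : Nat) : Int) = i by omega, bbest, bInner]
      apply PySem.List.foldl_congr_mem
      intro b k hk
      obtain ⟨hk1, hki⟩ := (PySem.List.mem_pyRange_one).1 hk
      dsimp only
      rw [ih k hk1 (by omega), pyGetD_toNat _ k 0 (by omega)]
    · rw [bbest, PySem.List.pyRange_one_eq_nil (by omega), List.foldl_nil,
        lyr_getD_lt N graph (t + 1) i.toNat (by omega)]

-- Source B's j-loop equals a fold of max over the layer-t values at city N
theorem bfold (N : Int) (graph : List (List Int)) (hN : 2 ≤ N) :
    ∀ u : Nat,
      (PySem.List.pyRange 2 (2 + (u : Int)) 1).foldl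
        (fun ans j => max ans (bbest graph (j - 2).toNat N)) 0 =
      ((List.range u).map (fun s => (lyr N graph s).getD N.toNat 0)).foldl max 0 := by
  intro u
  induction u with
  | zero =>
    rw [show (2 + ((0 : Nat) : Int)) = 2 by norm_num,
      PySem.List.pyRange_one_eq_nil (a := 2) (b := 2) (by omega), List.foldl_nil]
    rfl
  | succ u ih =>
    have hsplit : (2 + ((u + 1 : Nat) : Int)) = (2 + (u : Int)) + 1 := by push_cast; ring
    rw [hsplit, PySem.List.pyRange_one_succ_right (a := 2) (b := 2 + (u : Int)) (by omega),
      List.foldl_append, ih, List.foldl_cons, List.foldl_nil,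
      List.range_succ, List.map_append, List.foldl_append]
    simp only [List.map_cons, List.map_nil, List.foldl_cons, List.foldl_nil]
    congr 1
    rw [show ((2 + (u : Int)) - 2).toNat = u by omega,
      bbest_eq_lyr N graph hN u N (by omega) (le_refl _)]

theorem foldl_max_zero : ∀ k : Nat, (List.replicate k (0 : Int)).foldl max 0 = 0 := by
  intro k
  induction k with
  | zero => rfl
  | succ k ih => rw [List.replicate_succ, List.foldl_cons, max_self]; exact ih

theorem max_rep (k : Nat) :
    (PySem.List.max? (List.replicate k (0 : Int)) (fun y => y)).getD 0 = 0 := by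
  cases k with
  | zero => rfl
  | succ k =>
    rw [List.replicate_succ, PySem.List.max?_id_cons, Option.getD_some, foldl_max_zero]

theorem main_case (N M : Int) (graph : List (List Int)) (hN : 2 ≤ N) (hM : 2 ≤ M) :
    solution N M graph = solution_alt N M graph := by
  obtain ⟨hSh2, hent2⟩ := ofold_aux N M graph hN hM (N.toNat - 1) (le_refl _)
  rw [show (2 + ((N.toNat - 1 : Nat) : Int)) = N + 1 by omega] at hSh2 hent2
  simp only [solution, solution_alt]
  rw [if_neg (by omega)]
  set T := ((PySem.List.pyRange 2 (N + 1) 1).foldl (fun dp i =>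
        (PySem.List.pyRange 3 (M + 1) 1).foldl (fun dp j =>
          (PySem.List.pyRange 1 i 1).foldl (fun dp k =>
            if gg graph k i ≠ 0 ∧ gg dp k (j - 1) ≠ 0 then
              s2 dp i j (max (gg dp i j) (gg dp k (j - 1) + gg graph k i))
            else dp) dp) dp)
        ((PySem.List.pyRange 2 (N + 1) 1).foldl (fun dp i => s2 dp i 2 (gg graph 1 i))
          (List.replicate (N + 1).toNat (List.replicate (M + 1).toNat (0 : Int))))) with hT
  have hrowmem : T.getD N.toNat [] ∈ T := by
    rw [List.getD_eq_getElem _ _ (by rw [hSh2.1]; omega)]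
    exact List.getElem_mem _
  have hrlen : (T.getD N.toNat []).length = M.toNat + 1 := hSh2.2 _ hrowmem
  have hrow : T.getD N.toNat [] =
      0 :: 0 :: (List.range (M.toNat - 1)).map (fun s => (lyr N graph s).getD N.toNat 0) := by
    apply List.ext_getElem
    · rw [hrlen]; simp; omega
    · intro c hc1 hc2
      have hcm : c ≤ M.toNat := by rw [hrlen] at hc1; omega
      have hgetD : (T.getD N.toNat [])[c] = e T N.toNat c := by
        rw [e, List.getD_eq_getElem _ _ hc1]
      rw [hgetD, hent2 N.toNat c (le_refl _) hcm, if_pos (by omega)]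
      match c with
      | 0 => rw [W, if_neg (by omega)]; rfl
      | 1 => rw [W, if_neg (by omega)]; rfl
      | (c' + 2) =>
        rw [W, if_pos (by omega)]
        simp only [List.getElem_cons_succ]
        rw [List.getElem_map, List.getElem_range]
        rfl
  rw [pyGetD_toNat _ N [] (by omega), hrow, PySem.List.max?_id_cons]
  rw [show M + 1 = 2 + ((M.toNat - 1 : Nat) : Int) by omega, bfold N graph hN (M.toNat - 1)]
  simp only [Option.getD_some, List.foldl_cons, max_self]

theorem solution_eq_alt (N : Int) (M : Int) (graph : List (List Int))
    (h0N : 0 ≤ N) (h0M : 0 ≤ M) : solution N M graph = solution_alt N M graph := by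
  by_cases hN2 : N < 2
  · simp only [solution, solution_alt]
    rw [if_pos hN2, PySem.List.pyRange_one_eq_nil (a := 2) (b := N + 1) (by omega)]
    simp only [List.foldl_nil]
    rw [pyGetD_toNat _ N [] h0N, List.getD_eq_getElem _ _ (by simp; omega),
      List.getElem_replicate, max_rep]
  · by_cases hM2 : M < 2
    · simp only [solution, solution_alt]
      rw [if_neg hN2, PySem.List.pyRange_one_eq_nil (a := 2) (b := M + 1) (by omega),
        List.foldl_nil]
      have h1 : (PySem.List.pyRange 2 (N + 1) 1).foldl (fun dp i => s2 dp i 2 (gg graph 1 i))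
          (List.replicate (N + 1).toNat (List.replicate (M + 1).toNat (0 : Int))) =
          List.replicate (N + 1).toNat (List.replicate (M + 1).toNat (0 : Int)) := by
        apply foldl_fixed
        intro i hi
        obtain ⟨hi2, hiN⟩ := (PySem.List.mem_pyRange_one).1 hi
        have hrowv : (List.replicate (N + 1).toNat (List.replicate (M + 1).toNat (0 : Int))).getD
            i.toNat [] = List.replicate (M + 1).toNat (0 : Int) := by
          rw [List.getD_eq_getElem _ _ (by simp; omega), List.getElem_replicate]
        rw [s2, pyGetD_toNat _ i [] (by omega), hrowv,
          PySem.List.pySetD_of_nonneg _ _ (by omega : (0 : Int) ≤ 2),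
          set_oob _ _ _ (by simp; omega),
          PySem.List.pySetD_of_nonneg _ _ (by omega : (0 : Int) ≤ i)]
        have hself := set_getD_self
          (List.replicate (N + 1).toNat (List.replicate (M + 1).toNat (0 : Int))) i.toNat
          ([] : List Int)
        rw [hrowv] at hself
        exact hself
      rw [h1]
      have h2 : (PySem.List.pyRange 2 (N + 1) 1).foldl (fun dp i =>
          (PySem.List.pyRange 3 (M + 1) 1).foldl (fun dp j =>
            (PySem.List.pyRange 1 i 1).foldl (fun dp k =>
              if gg graph k i ≠ 0 ∧ gg dp k (j - 1) ≠ 0 then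
                s2 dp i j (max (gg dp i j) (gg dp k (j - 1) + gg graph k i))
              else dp) dp) dp)
          (List.replicate (N + 1).toNat (List.replicate (M + 1).toNat (0 : Int))) =
          List.replicate (N + 1).toNat (List.replicate (M + 1).toNat (0 : Int)) := by
        apply foldl_fixed
        intro i _
        rw [PySem.List.pyRange_one_eq_nil (a := 3) (b := M + 1) (by omega), List.foldl_nil]
      rw [h2, pyGetD_toNat _ N [] (by omega), List.getD_eq_getElem _ _ (by simp; omega),
        List.getElem_replicate, max_rep]
    · exact main_case N M graph (by omega) (by omega)

-- ===== VERDICT (by name: the statement is the Claim_ definition above) =====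
theorem solution_spec : Claim_equal_solution := by
  intro N M graph _ hpre
  unfold Spec_solution
  exact solution_eq_alt N M graph hpre.1 hpre.2.1
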